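-- pv_equiv track=rewrite | github.com/jcunto2010/python_test_condor | condor_python_jonathan_cunto.py | construir_prefijos
-- ===== SOURCE A (Python) =====
-- from itertools import permutations
--
-- def construir_prefijos(digitos):
--     # Prefijos de teléfonos móviles de Venezuela
--     prefijos_venezolanos = {"0412", "0424", "0426", "0416", "0414"}
--
--     # Convertir los prefijos a cadenas para facilitar la comparación
--     prefijos_venezolanos = set(prefijos_venezolanos)
--
--     # Lista para almacenar los prefijos encontrados y sus posiciones
--     prefijos_encontrados = []
--
--     # Generar todas las permutaciones posibles de 4 dígitos con sus índices
--     for permutacion in permutations(enumerate(digitos), 4):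
--         indices = tuple(p[0] for p in permutacion)
--         combinacion = ''.join(str(p[1]) for p in permutacion)
--         if combinacion in prefijos_venezolanos:
--             prefijos_encontrados.append((combinacion, indices))
--
--
--     return prefijos_encontrados
-- ===== SOURCE B (Python) =====
-- def construir_prefijos(digitos):
--     # One linear pass per needed digit instead of enumerating all 4-permutations:
--     # collect the positions of each digit a prefix can use, take the Cartesian
--     # product per prefix (keeping only position-distinct tuples), then sort the
--     # matches by their index tuple (the order A's permutation scan emits them in).
--     def posiciones(d):
--         return [i for i, x in enumerate(digitos) if x == d]
--
--     p0 = posiciones(0)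
--     p1 = posiciones(1)
--     p2 = posiciones(2)
--     p4 = posiciones(4)
--     p6 = posiciones(6)
--
--     encontrados = []
--     for prefijo, (xs, ys, zs, ws) in [
--         ("0412", (p0, p4, p1, p2)),
--         ("0414", (p0, p4, p1, p4)),
--         ("0416", (p0, p4, p1, p6)),
--         ("0424", (p0, p4, p2, p4)),
--         ("0426", (p0, p4, p2, p6)),
--     ]:
--         encontrados.extend(
--             (prefijo, (i, j, k, l))
--             for i in xs for j in ys for k in zs for l in ws
--             if i != j and i != k and i != l and j != k and j != l and k != l
--         )
--     encontrados.sort(key=lambda m: m[1])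
--     return encontrados
-- ===== Notes on version B (the rewrite author's own statement) =====
-- stated objective: faster
-- what changed: Instead of scanning all 4-permutations of (index, digit) pairs and joining their digits into a string, B collects the positions of each needed digit in linear passes, forms the per-prefix Cartesian product of those position lists (keeping index-distinct tuples), and sorts the matches by index tuple, which is exactly the order A's permutation scan emits them in.
import Mathlib
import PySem

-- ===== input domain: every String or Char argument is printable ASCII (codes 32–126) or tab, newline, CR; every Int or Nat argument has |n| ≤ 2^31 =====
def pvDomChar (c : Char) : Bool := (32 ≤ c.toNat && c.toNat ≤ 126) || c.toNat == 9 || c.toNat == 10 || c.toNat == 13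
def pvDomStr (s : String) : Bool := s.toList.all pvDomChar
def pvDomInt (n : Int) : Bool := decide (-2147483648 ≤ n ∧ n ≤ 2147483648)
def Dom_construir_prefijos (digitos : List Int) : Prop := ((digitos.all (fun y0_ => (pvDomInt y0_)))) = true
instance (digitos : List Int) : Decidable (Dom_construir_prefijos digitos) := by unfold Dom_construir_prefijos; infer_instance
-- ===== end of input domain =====

-- B replaces A's scan of all 4-permutations of (index, digit) pairs by per-prefix Cartesian
-- products of digit-position lists, sorted by index tuple: same return value, different algorithm.


-- ===== PORT A =====
def construir_prefijos (digitos : List Int) : List (String × List Int) :=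
  let prefijos_venezolanos : PySem.Set String :=
    PySem.Set.ofList ["0412", "0424", "0426", "0416", "0414"]
  let prefijos_venezolanos := PySem.Set.ofList prefijos_venezolanos
  (PySem.List.permutations (PySem.List.enumerate digitos) 4).foldl
    (fun prefijos_encontrados permutacion =>
      let indices := permutacion.map (fun p => p.1)
      let combinacion := PySem.Str.join "" (permutacion.map (fun p => PySem.Int.toStr p.2))
      if PySem.Set.contains prefijos_venezolanos combinacion then
        prefijos_encontrados ++ [(combinacion, indices)]
      else prefijos_encontrados)
    []

-- ===== PORT B =====
-- B helper: the list comprehension in posiciones(d) — positions of digit d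
def pvPosiciones (digitos : List Int) (d : Int) : List Int :=
  ((PySem.List.enumerate digitos).filter (fun p => p.2 == d)).map (fun p => p.1)

-- B helper: the nested generator expression (Cartesian product, distinct positions only)
def pvMatches (prefijo : String) (xs ys zs ws : List Int) : List (String × List Int) :=
  xs.flatMap (fun i => ys.flatMap (fun j => zs.flatMap (fun k => ws.flatMap (fun l =>
    if i ≠ j ∧ i ≠ k ∧ i ≠ l ∧ j ≠ k ∧ j ≠ l ∧ k ≠ l then [(prefijo, [i, j, k, l])] else []))))

def construir_prefijos_alt (digitos : List Int) : List (String × List Int) :=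
  let p0 := pvPosiciones digitos 0
  let p1 := pvPosiciones digitos 1
  let p2 := pvPosiciones digitos 2
  let p4 := pvPosiciones digitos 4
  let p6 := pvPosiciones digitos 6
  let encontrados :=
    [("0412", (p0, p4, p1, p2)), ("0414", (p0, p4, p1, p4)), ("0416", (p0, p4, p1, p6)),
     ("0424", (p0, p4, p2, p4)), ("0426", (p0, p4, p2, p6))].foldl
      (fun acc e => acc ++ pvMatches e.1 e.2.1 e.2.2.1 e.2.2.2.1 e.2.2.2.2) []
  PySem.List.sorted encontrados (fun m => m.2) false

-- ===== PRECONDITION & SPEC =====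
def Spec_construir_prefijos (digitos : List Int) (out : List (String × List Int)) : Prop := out = construir_prefijos_alt digitos
instance (digitos : List Int) (out : List (String × List Int)) : Decidable (Spec_construir_prefijos digitos out) := by unfold Spec_construir_prefijos; infer_instance

-- ===== CLAIM (what is proved, stated in full; the proofs are below) =====
def Claim_equal_construir_prefijos : Prop := ∀ (digitos : List Int), Dom_construir_prefijos digitos → Spec_construir_prefijos digitos (construir_prefijos digitos)

-- ===== LEMMAS AND PROOFS =====
theorem toDigitsCore_len_pos (f n : Nat) (hf : 0 < f) :
    1 ≤ (Nat.toDigitsCore 10 f n []).length := by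
  cases f with
  | zero => omega
  | succ f =>
    simp only [Nat.toDigitsCore]
    split
    · simp
    · rw [Nat.toDigitsCore_lens_eq]
      omega

theorem toDigits_small (m : Nat) (hm : m < 10) : Nat.toDigits 10 m = [Nat.digitChar m] := by
  simp [Nat.toDigits, Nat.toDigitsCore, Nat.div_eq_of_lt hm, Nat.mod_eq_of_lt hm]

theorem toDigits_big (m : Nat) (hm : 10 ≤ m) : 2 ≤ (Nat.toDigits 10 m).length := by
  have hne : m / 10 ≠ 0 := by omega
  simp only [Nat.toDigits, Nat.toDigitsCore, hne, if_false]
  rw [Nat.toDigitsCore_lens_eq]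
  have := toDigitsCore_len_pos m (m / 10) (by omega)
  omega

theorem toChars_ne_nil (x : Int) : PySem.Int.toChars x ≠ [] := by
  unfold PySem.Int.toChars
  split
  · simp
  · have := toDigitsCore_len_pos (x.toNat + 1) x.toNat (by omega)
    intro h
    rw [Nat.toDigits] at h
    simp [h] at this

theorem toChars_single (x : Int) (n : Nat) (hn : n < 10) :
    PySem.Int.toChars x = [Nat.digitChar n] ↔ x = n := by
  constructor
  · intro h
    unfold PySem.Int.toChars at h
    split at h
    · -- negative: '-' :: toDigits = [digitChar n] forces toDigits = []
      exfalso
      have hlen : (('-') :: Nat.toDigits 10 x.natAbs).length = 1 := by rw [h]; rfl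
      have hpos := toDigitsCore_len_pos (x.natAbs + 1) x.natAbs (by omega)
      rw [Nat.toDigits] at hlen
      simp only [List.length_cons] at hlen
      omega
    · rename_i hx
      by_cases hbig : 10 ≤ x.toNat
      · have := toDigits_big x.toNat hbig
        rw [h] at this; simp at this
      · rw [toDigits_small x.toNat (by omega)] at h
        have hc : Nat.digitChar x.toNat = Nat.digitChar n := by simpa using h
        have hmap : ∀ m, m < 10 → (Nat.digitChar m).toNat = 48 + m := by decide
        have := hmap x.toNat (by omega)
        rw [hc, hmap n hn] at this
        omega
  · rintro rfl
    simp only [PySem.Int.toChars]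
    rw [if_neg (by omega)]
    rw [show (n : Int).toNat = n from rfl]
    exact toDigits_small n hn

theorem concat4 (a b c d : Int) (c1 c2 c3 c4 : Char) :
    PySem.Int.toChars a ++ (PySem.Int.toChars b ++ (PySem.Int.toChars c ++ PySem.Int.toChars d)) = [c1, c2, c3, c4] ↔
      PySem.Int.toChars a = [c1] ∧ PySem.Int.toChars b = [c2] ∧ PySem.Int.toChars c = [c3] ∧ PySem.Int.toChars d = [c4] := by
  constructor
  · intro h
    have hl := congrArg List.length h
    simp only [List.length_append, List.length_cons, List.length_nil] at hl
    have ha := List.length_pos_iff.mpr (toChars_ne_nil a)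
    have hb := List.length_pos_iff.mpr (toChars_ne_nil b)
    have hc := List.length_pos_iff.mpr (toChars_ne_nil c)
    have hd := List.length_pos_iff.mpr (toChars_ne_nil d)
    obtain ⟨xa, hxa⟩ := List.length_eq_one_iff.mp (by omega : (PySem.Int.toChars a).length = 1)
    obtain ⟨xb, hxb⟩ := List.length_eq_one_iff.mp (by omega : (PySem.Int.toChars b).length = 1)
    obtain ⟨xc, hxc⟩ := List.length_eq_one_iff.mp (by omega : (PySem.Int.toChars c).length = 1)
    obtain ⟨xd, hxd⟩ := List.length_eq_one_iff.mp (by omega : (PySem.Int.toChars d).length = 1)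
    rw [hxa, hxb, hxc, hxd] at h
    simp at h
    simp [hxa, hxb, hxc, hxd, h]
  · rintro ⟨h1, h2, h3, h4⟩
    rw [h1, h2, h3, h4]
    rfl
theorem perms_succ {α : Type} (xs : List α) (r : Nat) : PySem.List.permutations xs (r+1) =
    (List.range xs.length).flatMap (fun i =>
      ((xs[i]?).map (fun x => (PySem.List.permutations (xs.eraseIdx i) r).map (fun p => x :: p))).getD []) := by
  simp only [PySem.List.permutations]
  congr 1
  funext i
  cases h : xs[i]? <;> simp

theorem perms_mem {α : Type} (r : Nat) (l : List α) (hl : l.Nodup) (u : List α) :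
    u ∈ PySem.List.permutations l r ↔ u.length = r ∧ u.Nodup ∧ ∀ x ∈ u, x ∈ l := by
  induction r generalizing l u with
  | zero =>
    rw [PySem.List.permutations_zero]
    constructor
    · rintro h
      simp at h
      subst h
      simp
    · rintro ⟨hlen, -, -⟩
      simp [List.length_eq_zero_iff.mp hlen]
  | succ r ih =>
    rw [perms_succ]
    simp only [List.mem_flatMap, List.mem_range]
    constructor
    · rintro ⟨i, hi, hu⟩
      rw [List.getElem?_eq_getElem hi] at hu
      simp only [Option.map_some, Option.getD_some, List.mem_map] at hu
      obtain ⟨p, hp, rfl⟩ := hu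
      have hsub : (l.eraseIdx i).Sublist l := List.eraseIdx_sublist l i
      obtain ⟨hlen, hnodup, hmem⟩ := (ih (l.eraseIdx i) (hl.eraseIdx i) p).mp hp
      refine ⟨by simp [hlen], List.nodup_cons.mpr ⟨?_, hnodup⟩, ?_⟩
      · intro hmm
        obtain ⟨j, hj, hne, hje⟩ := List.mem_eraseIdx_iff_getElem.mp (hmem _ hmm)
        exact hne ((List.Nodup.getElem_inj_iff hl).mp hje)
      · intro x hx
        rcases List.mem_cons.mp hx with rfl | hx
        · exact List.getElem_mem hi
        · exact hsub.mem (hmem x hx)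
    · rintro ⟨hlen, hnodup, hmem⟩
      cases u with
      | nil => simp at hlen
      | cons x u' =>
        obtain ⟨i, hi, hxe⟩ := List.getElem_of_mem (hmem x (by simp))
        refine ⟨i, hi, ?_⟩
        rw [List.getElem?_eq_getElem hi]
        simp only [Option.map_some, Option.getD_some, List.mem_map]
        refine ⟨u', ?_, by rw [hxe]⟩
        apply (ih _ (hl.eraseIdx i) u').mpr
        refine ⟨by simpa using hlen, (List.nodup_cons.mp hnodup).2, ?_⟩
        intro y hy
        obtain ⟨j, hj, hje⟩ := List.getElem_of_mem (hmem y (List.mem_cons_of_mem _ hy))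
        rw [List.mem_eraseIdx_iff_getElem]
        refine ⟨j, hj, ?_, hje⟩
        rintro rfl
        exact (List.nodup_cons.mp hnodup).1 (by rw [hxe] at hje; rw [← hje] at hy; exact hy)
theorem pairwise_flatMap_of {α β : Type} {R : β → β → Prop} {f : α → List β} {l : List α}
    (h1 : ∀ a ∈ l, (f a).Pairwise R)
    (h2 : l.Pairwise (fun a b => ∀ x ∈ f a, ∀ y ∈ f b, R x y)) :
    (l.flatMap f).Pairwise R := by
  rw [List.flatMap_def]
  apply List.pairwise_flatten.mpr
  refine ⟨?_, List.pairwise_map.mpr h2⟩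
  intro l' hl'
  obtain ⟨a, ha, rfl⟩ := List.mem_map.mp hl'
  exact h1 a ha

theorem perms_pairwise (r : Nat) (l : List (Int × Int)) (hl : l.Pairwise (fun p q => p.1 < q.1)) :
    (PySem.List.permutations l r).Pairwise
      (fun u v => u.map (fun p => p.1) < v.map (fun p => p.1)) := by
  induction r generalizing l with
  | zero => rw [PySem.List.permutations_zero]; simp
  | succ r ih =>
    rw [perms_succ]
    apply pairwise_flatMap_of
    · intro i hi
      rw [List.mem_range] at hi
      rw [List.getElem?_eq_getElem hi]
      simp only [Option.map_some, Option.getD_some]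
      apply List.pairwise_map.mpr
      have hps := ih (l.eraseIdx i) (hl.sublist (List.eraseIdx_sublist l i))
      refine hps.imp ?_
      intro u v huv
      simp only [List.map_cons]
      exact List.cons_lt_cons_iff.mpr (Or.inr ⟨rfl, huv⟩)
    · have hrange : (List.range l.length).Pairwise (· < ·) := List.pairwise_lt_range
      refine hrange.imp_of_mem ?_
      intro i j hi hj hij
      rw [List.mem_range] at hi hj
      intro x hx y hy
      rw [List.getElem?_eq_getElem hi] at hx
      rw [List.getElem?_eq_getElem hj] at hy
      simp only [Option.map_some, Option.getD_some, List.mem_map] at hx hy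
      obtain ⟨p, -, rfl⟩ := hx
      obtain ⟨q, -, rfl⟩ := hy
      have hfst : l[i].1 < l[j].1 := List.pairwise_iff_getElem.mp hl i j hi hj hij
      simp only [List.map_cons]
      exact List.cons_lt_cons_iff.mpr (Or.inl hfst)


theorem mem_if_singleton {β : Type} (c : Prop) [Decidable c] (y e : β) :
    e ∈ (if c then [y] else []) ↔ c ∧ e = y := by
  split <;> simp_all

theorem mem_pos (digitos : List Int) (d i : Int) :
    i ∈ pvPosiciones digitos d ↔ ∃ k : Nat, i = k ∧ digitos[k]? = some d := by
  simp only [pvPosiciones, List.mem_map, List.mem_filter, PySem.List.mem_enumerate_iff]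
  constructor
  · rintro ⟨p, ⟨⟨k, hk, hp⟩, hbeq⟩, rfl⟩
    subst hp
    refine ⟨k, by simp, ?_⟩
    rw [List.getElem?_eq_getElem hk]
    simpa using hbeq
  · rintro ⟨k, rfl, hget⟩
    obtain ⟨hk, hval⟩ := List.getElem?_eq_some_iff.mp hget
    exact ⟨(0 + k, digitos[k]), ⟨⟨k, hk, rfl⟩, by simpa using hval⟩, by simp⟩

theorem pos_pairwise (digitos : List Int) (d : Int) :
    (pvPosiciones digitos d).Pairwise (· < ·) := by
  apply List.pairwise_map.mpr
  exact ((PySem.List.pairwise_lt_enumerate digitos 0).sublist List.filter_sublist).imp (fun h => h)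

theorem mem_pvMatches (p : String) (xs ys zs ws : List Int) (e : String × List Int) :
    e ∈ pvMatches p xs ys zs ws ↔
      ∃ i j k l, i ∈ xs ∧ j ∈ ys ∧ k ∈ zs ∧ l ∈ ws ∧
        (i ≠ j ∧ i ≠ k ∧ i ≠ l ∧ j ≠ k ∧ j ≠ l ∧ k ≠ l) ∧ e = (p, [i, j, k, l]) := by
  simp only [pvMatches, List.mem_flatMap, mem_if_singleton]
  tauto

theorem fst_of_mem_pvMatches (p : String) (xs ys zs ws : List Int) (e : String × List Int)
    (h : e ∈ pvMatches p xs ys zs ws) : e.1 = p := by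
  obtain ⟨i, j, k, l, -, -, -, -, -, rfl⟩ := (mem_pvMatches p xs ys zs ws e).mp h
  rfl
theorem pvMatches_pairwise (p : String) (xs ys zs ws : List Int)
    (hx : xs.Pairwise (· < ·)) (hy : ys.Pairwise (· < ·))
    (hz : zs.Pairwise (· < ·)) (hw : ws.Pairwise (· < ·)) :
    (pvMatches p xs ys zs ws).Pairwise (fun a b => a.2 < b.2) := by
  unfold pvMatches
  apply pairwise_flatMap_of
  · intro i _
    apply pairwise_flatMap_of
    · intro j _
      apply pairwise_flatMap_of
      · intro k _
        apply pairwise_flatMap_of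
        · intro l _
          split <;> simp
        · refine hw.imp_of_mem ?_
          intro l1 l2 _ _ hlt x hx' y hy'
          rw [mem_if_singleton] at hx' hy'
          obtain ⟨-, rfl⟩ := hx'
          obtain ⟨-, rfl⟩ := hy'
          exact List.cons_lt_cons_iff.mpr (Or.inr ⟨rfl, List.cons_lt_cons_iff.mpr (Or.inr ⟨rfl,
            List.cons_lt_cons_iff.mpr (Or.inr ⟨rfl, List.cons_lt_cons_iff.mpr (Or.inl hlt)⟩)⟩)⟩)
      · refine hz.imp_of_mem ?_
        intro k1 k2 _ _ hlt x hx' y hy'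
        simp only [List.mem_flatMap, mem_if_singleton] at hx' hy'
        obtain ⟨l1, -, -, rfl⟩ := hx'
        obtain ⟨l2, -, -, rfl⟩ := hy'
        exact List.cons_lt_cons_iff.mpr (Or.inr ⟨rfl, List.cons_lt_cons_iff.mpr (Or.inr ⟨rfl,
          List.cons_lt_cons_iff.mpr (Or.inl hlt)⟩)⟩)
    · refine hy.imp_of_mem ?_
      intro j1 j2 _ _ hlt x hx' y hy'
      simp only [List.mem_flatMap, mem_if_singleton] at hx' hy'
      obtain ⟨k1, -, l1, -, -, rfl⟩ := hx'
      obtain ⟨k2, -, l2, -, -, rfl⟩ := hy'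
      exact List.cons_lt_cons_iff.mpr (Or.inr ⟨rfl, List.cons_lt_cons_iff.mpr (Or.inl hlt)⟩)
  · refine hx.imp_of_mem ?_
    intro i1 i2 _ _ hlt x hx' y hy'
    simp only [List.mem_flatMap, mem_if_singleton] at hx' hy'
    obtain ⟨j1, -, k1, -, l1, -, -, rfl⟩ := hx'
    obtain ⟨j2, -, k2, -, l2, -, -, rfl⟩ := hy'
    exact List.cons_lt_cons_iff.mpr (Or.inl hlt)
def pvComb (u : List (Int × Int)) : String :=
  PySem.Str.join "" (u.map (fun p => PySem.Int.toStr p.2))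
def pvMatched (u : List (Int × Int)) : Bool :=
  PySem.Set.contains (PySem.Set.ofList (PySem.Set.ofList ["0412", "0424", "0426", "0416", "0414"])) (pvComb u)

theorem comb_toList (i1 i2 i3 i4 a b c d : Int) :
    (pvComb [(i1,a),(i2,b),(i3,c),(i4,d)]).toList =
      PySem.Int.toChars a ++ (PySem.Int.toChars b ++ (PySem.Int.toChars c ++ PySem.Int.toChars d)) := by
  simp [pvComb, PySem.Str.toList_join, PySem.Chars.join_cons_cons, PySem.Chars.join_singleton,
    PySem.Int.toList_toStr]

theorem comb_eq_iff (i1 i2 i3 i4 a b c d : Int) (s : String) (n1 n2 n3 n4 : Nat)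
    (h1 : n1 < 10) (h2 : n2 < 10) (h3 : n3 < 10) (h4 : n4 < 10)
    (hs : s.toList = [Nat.digitChar n1, Nat.digitChar n2, Nat.digitChar n3, Nat.digitChar n4]) :
    pvComb [(i1,a),(i2,b),(i3,c),(i4,d)] = s ↔ (a = n1 ∧ b = n2 ∧ c = n3 ∧ d = n4) := by
  rw [← String.toList_inj, comb_toList, hs, concat4,
    toChars_single a n1 h1, toChars_single b n2 h2, toChars_single c n3 h3, toChars_single d n4 h4]

theorem matched_iff (i1 i2 i3 i4 a b c d : Int) :
    pvMatched [(i1, a), (i2, b), (i3, c), (i4, d)] = true ↔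
      ((a = 0 ∧ b = 4 ∧ c = 1 ∧ d = 2) ∨ (a = 0 ∧ b = 4 ∧ c = 1 ∧ d = 4) ∨
       (a = 0 ∧ b = 4 ∧ c = 1 ∧ d = 6) ∨ (a = 0 ∧ b = 4 ∧ c = 2 ∧ d = 4) ∨
       (a = 0 ∧ b = 4 ∧ c = 2 ∧ d = 6)) := by
  rw [pvMatched,
    show PySem.Set.ofList (PySem.Set.ofList ["0412", "0424", "0426", "0416", "0414"]) =
      (["0412", "0424", "0426", "0416", "0414"] : List String) from by decide,
    PySem.Set.contains_iff]
  simp only [List.mem_cons, List.not_mem_nil, or_false]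
  rw [comb_eq_iff i1 i2 i3 i4 a b c d "0412" 0 4 1 2 (by omega) (by omega) (by omega) (by omega) rfl,
      comb_eq_iff i1 i2 i3 i4 a b c d "0424" 0 4 2 4 (by omega) (by omega) (by omega) (by omega) rfl,
      comb_eq_iff i1 i2 i3 i4 a b c d "0426" 0 4 2 6 (by omega) (by omega) (by omega) (by omega) rfl,
      comb_eq_iff i1 i2 i3 i4 a b c d "0416" 0 4 1 6 (by omega) (by omega) (by omega) (by omega) rfl,
      comb_eq_iff i1 i2 i3 i4 a b c d "0414" 0 4 1 4 (by omega) (by omega) (by omega) (by omega) rfl]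
  push_cast
  tauto

theorem comb_val (i1 i2 i3 i4 a b c d : Int) (s : String) (n1 n2 n3 n4 : Nat)
    (h1 : n1 < 10) (h2 : n2 < 10) (h3 : n3 < 10) (h4 : n4 < 10)
    (hs : s.toList = [Nat.digitChar n1, Nat.digitChar n2, Nat.digitChar n3, Nat.digitChar n4])
    (ha : a = n1) (hb : b = n2) (hc : c = n3) (hd : d = n4) :
    pvComb [(i1, a), (i2, b), (i3, c), (i4, d)] = s :=
  (comb_eq_iff i1 i2 i3 i4 a b c d s n1 n2 n3 n4 h1 h2 h3 h4 hs).mpr ⟨ha, hb, hc, hd⟩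
def pvOut (u : List (Int × Int)) : String × List Int :=
  (pvComb u, u.map (fun p => p.1))

def pvGoodP (digitos : List Int) (s : String) (d3 d4 : Int) (e : String × List Int) : Prop :=
  ∃ i1 i2 i3 i4 : Nat, i1 ≠ i2 ∧ i1 ≠ i3 ∧ i1 ≠ i4 ∧ i2 ≠ i3 ∧ i2 ≠ i4 ∧ i3 ≠ i4 ∧
    digitos[i1]? = some 0 ∧ digitos[i2]? = some 4 ∧ digitos[i3]? = some d3 ∧ digitos[i4]? = some d4 ∧
    e = (s, [(i1 : Int), (i2 : Int), (i3 : Int), (i4 : Int)])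

def pvGood (digitos : List Int) (e : String × List Int) : Prop :=
  pvGoodP digitos "0412" 1 2 e ∨ pvGoodP digitos "0414" 1 4 e ∨ pvGoodP digitos "0416" 1 6 e ∨
  pvGoodP digitos "0424" 2 4 e ∨ pvGoodP digitos "0426" 2 6 e

theorem len4 {α : Type} (u : List α) (h : u.length = 4) : ∃ a b c d, u = [a, b, c, d] := by
  rcases u with _ | ⟨a, _ | ⟨b, _ | ⟨c, _ | ⟨d, _ | ⟨e, t⟩⟩⟩⟩⟩ <;>
      simp only [List.length_cons, List.length_nil] at h <;> try omega
  exact ⟨a, b, c, d, rfl⟩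

theorem enum_nodup (digitos : List Int) : (PySem.List.enumerate digitos).Nodup :=
  (PySem.List.pairwise_lt_enumerate (xs := digitos) (s := 0)).imp
    (fun h heq => by subst heq; exact lt_irrefl _ h)

theorem memBlock_iff (digitos : List Int) (s : String) (d3 d4 : Int) (e : String × List Int) :
    e ∈ pvMatches s (pvPosiciones digitos 0) (pvPosiciones digitos 4)
          (pvPosiciones digitos d3) (pvPosiciones digitos d4) ↔ pvGoodP digitos s d3 d4 e := by
  rw [mem_pvMatches]
  unfold pvGoodP
  constructor
  · rintro ⟨i, j, k, l, hi, hj, hk, hl, hdist, rfl⟩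
    rw [mem_pos] at hi hj hk hl
    obtain ⟨i1, rfl, g1⟩ := hi
    obtain ⟨i2, rfl, g2⟩ := hj
    obtain ⟨i3, rfl, g3⟩ := hk
    obtain ⟨i4, rfl, g4⟩ := hl
    exact ⟨i1, i2, i3, i4, by exact_mod_cast hdist.1, by exact_mod_cast hdist.2.1,
      by exact_mod_cast hdist.2.2.1, by exact_mod_cast hdist.2.2.2.1,
      by exact_mod_cast hdist.2.2.2.2.1, by exact_mod_cast hdist.2.2.2.2.2,
      g1, g2, g3, g4, rfl⟩
  · rintro ⟨i1, i2, i3, i4, d12, d13, d14, d23, d24, d34, g1, g2, g3, g4, rfl⟩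
    refine ⟨i1, i2, i3, i4, (mem_pos _ _ _).mpr ⟨i1, rfl, g1⟩, (mem_pos _ _ _).mpr ⟨i2, rfl, g2⟩,
      (mem_pos _ _ _).mpr ⟨i3, rfl, g3⟩, (mem_pos _ _ _).mpr ⟨i4, rfl, g4⟩,
      ⟨by exact_mod_cast d12, by exact_mod_cast d13, by exact_mod_cast d14,
       by exact_mod_cast d23, by exact_mod_cast d24, by exact_mod_cast d34⟩, rfl⟩

theorem memB_iff (digitos : List Int) (e : String × List Int) :
    e ∈ (pvMatches "0412" (pvPosiciones digitos 0) (pvPosiciones digitos 4) (pvPosiciones digitos 1) (pvPosiciones digitos 2) ++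
         pvMatches "0414" (pvPosiciones digitos 0) (pvPosiciones digitos 4) (pvPosiciones digitos 1) (pvPosiciones digitos 4) ++
         pvMatches "0416" (pvPosiciones digitos 0) (pvPosiciones digitos 4) (pvPosiciones digitos 1) (pvPosiciones digitos 6) ++
         pvMatches "0424" (pvPosiciones digitos 0) (pvPosiciones digitos 4) (pvPosiciones digitos 2) (pvPosiciones digitos 4) ++
         pvMatches "0426" (pvPosiciones digitos 0) (pvPosiciones digitos 4) (pvPosiciones digitos 2) (pvPosiciones digitos 6)) ↔
      pvGood digitos e := by
  simp only [List.mem_append, memBlock_iff]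
  unfold pvGood
  tauto
theorem goodP_memA (digitos : List Int) (s : String) (d3 d4 : Int)
    (hcomb : ∀ x1 x2 x3 x4 : Int, pvComb [(x1, (0:Int)), (x2, 4), (x3, d3), (x4, d4)] = s)
    (hpat : (d3 = 1 ∧ (d4 = 2 ∨ d4 = 4 ∨ d4 = 6)) ∨ (d3 = 2 ∧ (d4 = 4 ∨ d4 = 6)))
    (e : String × List Int) (h : pvGoodP digitos s d3 d4 e) :
    e ∈ ((PySem.List.permutations (PySem.List.enumerate digitos) 4).filter pvMatched).map pvOut := by
  obtain ⟨i1, i2, i3, i4, d12, d13, d14, d23, d24, d34, g1, g2, g3, g4, rfl⟩ := h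
  obtain ⟨h1, v1⟩ := List.getElem?_eq_some_iff.mp g1
  obtain ⟨h2, v2⟩ := List.getElem?_eq_some_iff.mp g2
  obtain ⟨h3, v3⟩ := List.getElem?_eq_some_iff.mp g3
  obtain ⟨h4, v4⟩ := List.getElem?_eq_some_iff.mp g4
  have c12 : (i1 : Int) ≠ i2 := by exact_mod_cast d12
  have c13 : (i1 : Int) ≠ i3 := by exact_mod_cast d13
  have c14 : (i1 : Int) ≠ i4 := by exact_mod_cast d14
  have c23 : (i2 : Int) ≠ i3 := by exact_mod_cast d23
  have c24 : (i2 : Int) ≠ i4 := by exact_mod_cast d24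
  have c34 : (i3 : Int) ≠ i4 := by exact_mod_cast d34
  rw [List.mem_map]
  refine ⟨[((i1:Int), (0:Int)), ((i2:Int), 4), ((i3:Int), d3), ((i4:Int), d4)], ?_, ?_⟩
  · rw [List.mem_filter]
    refine ⟨(perms_mem 4 _ (enum_nodup digitos) _).mpr ⟨rfl, ?_, ?_⟩, ?_⟩
    · simp [List.nodup_cons, Prod.mk.injEq, c12, c13, c14, c23, c24, c34]
    · intro x hx
      rw [PySem.List.mem_enumerate_iff]
      simp only [List.mem_cons, List.not_mem_nil, or_false] at hx
      rcases hx with rfl | rfl | rfl | rfl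
      · exact ⟨i1, h1, by simp [v1]⟩
      · exact ⟨i2, h2, by simp [v2]⟩
      · exact ⟨i3, h3, by simp [v3]⟩
      · exact ⟨i4, h4, by simp [v4]⟩
    · rw [matched_iff]
      rcases hpat with ⟨rfl, rfl | rfl | rfl⟩ | ⟨rfl, rfl | rfl⟩ <;> norm_num
  · simp [pvOut, hcomb]

theorem memA_good (digitos : List Int) (e : String × List Int)
    (h : e ∈ ((PySem.List.permutations (PySem.List.enumerate digitos) 4).filter pvMatched).map pvOut) :
    pvGood digitos e := by
  rw [List.mem_map] at h
  obtain ⟨u, hu, rfl⟩ := h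
  rw [List.mem_filter] at hu
  obtain ⟨hperm, hmatch⟩ := hu
  obtain ⟨hlen, hnd, hmem⟩ := (perms_mem 4 _ (enum_nodup digitos) u).mp hperm
  obtain ⟨p1, p2, p3, p4, rfl⟩ := len4 u hlen
  obtain ⟨k1, hk1, e1⟩ := (PySem.List.mem_enumerate_iff _ _ _).mp (hmem p1 (by simp))
  obtain ⟨k2, hk2, e2⟩ := (PySem.List.mem_enumerate_iff _ _ _).mp (hmem p2 (by simp))
  obtain ⟨k3, hk3, e3⟩ := (PySem.List.mem_enumerate_iff _ _ _).mp (hmem p3 (by simp))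
  obtain ⟨k4, hk4, e4⟩ := (PySem.List.mem_enumerate_iff _ _ _).mp (hmem p4 (by simp))
  subst e1; subst e2; subst e3; subst e4
  have n12 : k1 ≠ k2 := by rintro rfl; simp at hnd
  have n13 : k1 ≠ k3 := by rintro rfl; simp at hnd
  have n14 : k1 ≠ k4 := by rintro rfl; simp at hnd
  have n23 : k2 ≠ k3 := by rintro rfl; simp at hnd
  have n24 : k2 ≠ k4 := by rintro rfl; simp at hnd
  have n34 : k3 ≠ k4 := by rintro rfl; simp at hnd
  rw [matched_iff] at hmatch
  unfold pvGood pvGoodP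
  rcases hmatch with ⟨w1, w2, w3, w4⟩ | ⟨w1, w2, w3, w4⟩ | ⟨w1, w2, w3, w4⟩ |
      ⟨w1, w2, w3, w4⟩ | ⟨w1, w2, w3, w4⟩
  · refine Or.inl ⟨k1, k2, k3, k4, n12, n13, n14, n23, n24, n34, ?_, ?_, ?_, ?_, ?_⟩ <;>
      first
        | (rw [List.getElem?_eq_getElem ‹_›]; simp_all)
        | (refine Prod.ext ?_ (by simp [pvOut])
           show pvComb _ = "0412"
           exact comb_val _ _ _ _ _ _ _ _ _ 0 4 1 2 (by omega) (by omega) (by omega) (by omega) rfl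
             (by exact_mod_cast w1) (by exact_mod_cast w2) (by exact_mod_cast w3) (by exact_mod_cast w4))
  · refine Or.inr (Or.inl ⟨k1, k2, k3, k4, n12, n13, n14, n23, n24, n34, ?_, ?_, ?_, ?_, ?_⟩) <;>
      first
        | (rw [List.getElem?_eq_getElem ‹_›]; simp_all)
        | (refine Prod.ext ?_ (by simp [pvOut])
           show pvComb _ = "0414"
           exact comb_val _ _ _ _ _ _ _ _ _ 0 4 1 4 (by omega) (by omega) (by omega) (by omega) rfl
             (by exact_mod_cast w1) (by exact_mod_cast w2) (by exact_mod_cast w3) (by exact_mod_cast w4))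
  · refine Or.inr (Or.inr (Or.inl ⟨k1, k2, k3, k4, n12, n13, n14, n23, n24, n34, ?_, ?_, ?_, ?_, ?_⟩)) <;>
      first
        | (rw [List.getElem?_eq_getElem ‹_›]; simp_all)
        | (refine Prod.ext ?_ (by simp [pvOut])
           show pvComb _ = "0416"
           exact comb_val _ _ _ _ _ _ _ _ _ 0 4 1 6 (by omega) (by omega) (by omega) (by omega) rfl
             (by exact_mod_cast w1) (by exact_mod_cast w2) (by exact_mod_cast w3) (by exact_mod_cast w4))
  · refine Or.inr (Or.inr (Or.inr (Or.inl ⟨k1, k2, k3, k4, n12, n13, n14, n23, n24, n34, ?_, ?_, ?_, ?_, ?_⟩))) <;>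
      first
        | (rw [List.getElem?_eq_getElem ‹_›]; simp_all)
        | (refine Prod.ext ?_ (by simp [pvOut])
           show pvComb _ = "0424"
           exact comb_val _ _ _ _ _ _ _ _ _ 0 4 2 4 (by omega) (by omega) (by omega) (by omega) rfl
             (by exact_mod_cast w1) (by exact_mod_cast w2) (by exact_mod_cast w3) (by exact_mod_cast w4))
  · refine Or.inr (Or.inr (Or.inr (Or.inr ⟨k1, k2, k3, k4, n12, n13, n14, n23, n24, n34, ?_, ?_, ?_, ?_, ?_⟩))) <;>
      first
        | (rw [List.getElem?_eq_getElem ‹_›]; simp_all)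
        | (refine Prod.ext ?_ (by simp [pvOut])
           show pvComb _ = "0426"
           exact comb_val _ _ _ _ _ _ _ _ _ 0 4 2 6 (by omega) (by omega) (by omega) (by omega) rfl
             (by exact_mod_cast w1) (by exact_mod_cast w2) (by exact_mod_cast w3) (by exact_mod_cast w4))
theorem memA_iff (digitos : List Int) (e : String × List Int) :
    e ∈ ((PySem.List.permutations (PySem.List.enumerate digitos) 4).filter pvMatched).map pvOut ↔
      pvGood digitos e := by
  constructor
  · exact memA_good digitos e
  · rintro (h | h | h | h | h)
    · exact goodP_memA digitos "0412" 1 2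
        (fun x1 x2 x3 x4 => comb_val x1 x2 x3 x4 _ _ _ _ _ 0 4 1 2 (by omega) (by omega) (by omega)
          (by omega) rfl (by norm_num) (by norm_num) (by norm_num) (by norm_num))
        (by norm_num) e h
    · exact goodP_memA digitos "0414" 1 4
        (fun x1 x2 x3 x4 => comb_val x1 x2 x3 x4 _ _ _ _ _ 0 4 1 4 (by omega) (by omega) (by omega)
          (by omega) rfl (by norm_num) (by norm_num) (by norm_num) (by norm_num))
        (by norm_num) e h
    · exact goodP_memA digitos "0416" 1 6
        (fun x1 x2 x3 x4 => comb_val x1 x2 x3 x4 _ _ _ _ _ 0 4 1 6 (by omega) (by omega) (by omega)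
          (by omega) rfl (by norm_num) (by norm_num) (by norm_num) (by norm_num))
        (by norm_num) e h
    · exact goodP_memA digitos "0424" 2 4
        (fun x1 x2 x3 x4 => comb_val x1 x2 x3 x4 _ _ _ _ _ 0 4 2 4 (by omega) (by omega) (by omega)
          (by omega) rfl (by norm_num) (by norm_num) (by norm_num) (by norm_num))
        (by norm_num) e h
    · exact goodP_memA digitos "0426" 2 6
        (fun x1 x2 x3 x4 => comb_val x1 x2 x3 x4 _ _ _ _ _ 0 4 2 6 (by omega) (by omega) (by omega)
          (by omega) rfl (by norm_num) (by norm_num) (by norm_num) (by norm_num))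
        (by norm_num) e h

theorem A_pairwise (digitos : List Int) :
    (((PySem.List.permutations (PySem.List.enumerate digitos) 4).filter pvMatched).map pvOut).Pairwise
      (fun a b => a.2 < b.2) := by
  apply List.pairwise_map.mpr
  exact ((perms_pairwise 4 _ (PySem.List.pairwise_lt_enumerate digitos 0)).sublist
    List.filter_sublist).imp (fun h => h)

theorem block_nodup (digitos : List Int) (s : String) (d3 d4 : Int) :
    (pvMatches s (pvPosiciones digitos 0) (pvPosiciones digitos 4)
      (pvPosiciones digitos d3) (pvPosiciones digitos d4)).Nodup :=
  (pvMatches_pairwise _ _ _ _ _ (pos_pairwise _ _) (pos_pairwise _ _) (pos_pairwise _ _)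
    (pos_pairwise _ _)).imp (fun h heq => by subst heq; exact lt_irrefl _ h)

theorem block_disjoint (s t : String) (xs ys zs ws xs' ys' zs' ws' : List Int) (hst : s ≠ t) :
    (pvMatches s xs ys zs ws).Disjoint (pvMatches t xs' ys' zs' ws') := by
  intro x hx hy
  exact hst ((fst_of_mem_pvMatches _ _ _ _ _ _ hx).symm.trans (fst_of_mem_pvMatches _ _ _ _ _ _ hy))

theorem B_nodup (digitos : List Int) :
    (pvMatches "0412" (pvPosiciones digitos 0) (pvPosiciones digitos 4) (pvPosiciones digitos 1) (pvPosiciones digitos 2) ++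
     pvMatches "0414" (pvPosiciones digitos 0) (pvPosiciones digitos 4) (pvPosiciones digitos 1) (pvPosiciones digitos 4) ++
     pvMatches "0416" (pvPosiciones digitos 0) (pvPosiciones digitos 4) (pvPosiciones digitos 1) (pvPosiciones digitos 6) ++
     pvMatches "0424" (pvPosiciones digitos 0) (pvPosiciones digitos 4) (pvPosiciones digitos 2) (pvPosiciones digitos 4) ++
     pvMatches "0426" (pvPosiciones digitos 0) (pvPosiciones digitos 4) (pvPosiciones digitos 2) (pvPosiciones digitos 6)).Nodup := by
  refine List.Nodup.append (List.Nodup.append (List.Nodup.append (List.Nodup.append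
    (block_nodup digitos "0412" 1 2) (block_nodup digitos "0414" 1 4) ?_)
    (block_nodup digitos "0416" 1 6) ?_) (block_nodup digitos "0424" 2 4) ?_)
    (block_nodup digitos "0426" 2 6) ?_
  · exact block_disjoint _ _ _ _ _ _ _ _ _ _ (by decide)
  · exact List.disjoint_append_left.mpr
      ⟨block_disjoint _ _ _ _ _ _ _ _ _ _ (by decide), block_disjoint _ _ _ _ _ _ _ _ _ _ (by decide)⟩
  · exact List.disjoint_append_left.mpr ⟨List.disjoint_append_left.mpr
      ⟨block_disjoint _ _ _ _ _ _ _ _ _ _ (by decide), block_disjoint _ _ _ _ _ _ _ _ _ _ (by decide)⟩,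
      block_disjoint _ _ _ _ _ _ _ _ _ _ (by decide)⟩
  · exact List.disjoint_append_left.mpr ⟨List.disjoint_append_left.mpr ⟨List.disjoint_append_left.mpr
      ⟨block_disjoint _ _ _ _ _ _ _ _ _ _ (by decide), block_disjoint _ _ _ _ _ _ _ _ _ _ (by decide)⟩,
      block_disjoint _ _ _ _ _ _ _ _ _ _ (by decide)⟩,
      block_disjoint _ _ _ _ _ _ _ _ _ _ (by decide)⟩

-- A's fold is filter-then-map
theorem A_eq (digitos : List Int) :
    construir_prefijos digitos =
      ((PySem.List.permutations (PySem.List.enumerate digitos) 4).filter pvMatched).map pvOut := by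
  show List.foldl (fun acc u => if pvMatched u then acc ++ [pvOut u] else acc) []
      (PySem.List.permutations (PySem.List.enumerate digitos) 4) = _
  rw [PySem.List.foldl_append_if, List.nil_append]

-- B's accumulating loop over the five prefix entries, unfolded
theorem B_eq (digitos : List Int) :
    construir_prefijos_alt digitos =
      PySem.List.sorted
        (pvMatches "0412" (pvPosiciones digitos 0) (pvPosiciones digitos 4) (pvPosiciones digitos 1) (pvPosiciones digitos 2) ++
         pvMatches "0414" (pvPosiciones digitos 0) (pvPosiciones digitos 4) (pvPosiciones digitos 1) (pvPosiciones digitos 4) ++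
         pvMatches "0416" (pvPosiciones digitos 0) (pvPosiciones digitos 4) (pvPosiciones digitos 1) (pvPosiciones digitos 6) ++
         pvMatches "0424" (pvPosiciones digitos 0) (pvPosiciones digitos 4) (pvPosiciones digitos 2) (pvPosiciones digitos 4) ++
         pvMatches "0426" (pvPosiciones digitos 0) (pvPosiciones digitos 4) (pvPosiciones digitos 2) (pvPosiciones digitos 6))
        (fun m => m.2) false := by
  simp only [construir_prefijos_alt, List.foldl_cons, List.foldl_nil, List.nil_append]

-- ===== VERDICT (by name: the statement is the Claim_ definition above) =====
theorem construir_prefijos_spec : Claim_equal_construir_prefijos := by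
  intro digitos _
  show construir_prefijos digitos = construir_prefijos_alt digitos
  rw [A_eq, B_eq]
  have hi : (fun (a b : List ℤ) => a.decidableLT b) = (List.instLinearOrder (α := ℤ)).toDecidableLT :=
    Subsingleton.elim _ _
  rw [show (fun a b : List ℤ => a.decidableLT b) = _ from hi]
  refine (PySem.List.sorted_eq_of_perm_of_pairwise_lt _ _ _ ?_ (A_pairwise digitos)).symm
  have hA : (((PySem.List.permutations (PySem.List.enumerate digitos) 4).filter pvMatched).map pvOut).Nodup :=
    (A_pairwise digitos).imp (fun h => by rintro rfl; exact lt_irrefl _ h)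
  exact ((List.perm_ext_iff_of_nodup hA (B_nodup digitos)).2
    (fun e => (memA_iff digitos e).trans (memB_iff digitos e).symm))
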